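-- pv_equiv track=rewrite | github.com/anonymous-share-review/CEAE | code/agents/utils/level3_tools.py | is_green_feature
-- ===== SOURCE A (Python) =====
-- from typing import Any, Dict, List, Optional, Tuple, Iterable, Callable
--
-- GREEN_TAGS = {
--     "landuse": {
--         "grass", "flowerbed", "forest", "meadow", "recreation_ground",
--         "greenery", "village_green", "allotments", "orchard", "vineyard",
--         "plant_nursery", "greenhouse_horticulture", "tree_pit", "green",
--     },
--     "leisure": {
--         "garden", "park", "nature_reserve", "common", "commons",
--         "parklet", "recreation_ground", "disc_golf_course",
--     },
--     "natural": {
--         "wood", "scrub", "grassland", "shrubbery",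
--         "heath", "grass", "tree_group", "wetland",
--     },
--     "plant": {"tree"},
-- }
--
-- def is_green_feature(feature: Dict[str, Any]) -> bool:
--     props = feature.get("properties") or {}
--     tags = props.get("tags") or {}
--     if not isinstance(tags, dict) or not tags:
--         return False
--     for k, v in tags.items():
--         if k in GREEN_TAGS:
--             vv = str(v).strip().lower()
--             if vv in GREEN_TAGS[k]:
--                 return True
--     return False
-- ===== SOURCE B (Python) =====
-- GREEN_TAGS = {
--     "landuse": {
--         "grass", "flowerbed", "forest", "meadow", "recreation_ground",
--         "greenery", "village_green", "allotments", "orchard", "vineyard",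
--         "plant_nursery", "greenhouse_horticulture", "tree_pit", "green",
--     },
--     "leisure": {
--         "garden", "park", "nature_reserve", "common", "commons",
--         "parklet", "recreation_ground", "disc_golf_course",
--     },
--     "natural": {
--         "wood", "scrub", "grassland", "shrubbery",
--         "heath", "grass", "tree_group", "wetland",
--     },
--     "plant": {"tree"},
-- }
--
-- def is_green_feature(feature):
--     props = feature.get("properties") or {}
--     tags = props.get("tags") or {}
--     if not isinstance(tags, dict) or not tags:
--         return False
--     # iterate the fixed 4-key reference table and look each category up in tags,
--     # instead of scanning every input tag
--     return any(
--         k in tags and str(tags[k]).strip().lower() in vals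
--         for k, vals in GREEN_TAGS.items()
--     )
-- ===== Notes on version B (the rewrite author's own statement) =====
-- stated objective: simpler
-- what changed: B inverts the iteration: instead of scanning every input tag and testing it against GREEN_TAGS, it probes the fixed 4-entry GREEN_TAGS table with one dict lookup per category (any(k in tags and str(tags[k]).strip().lower() in vals for k, vals in GREEN_TAGS.items())).
import Mathlib
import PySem

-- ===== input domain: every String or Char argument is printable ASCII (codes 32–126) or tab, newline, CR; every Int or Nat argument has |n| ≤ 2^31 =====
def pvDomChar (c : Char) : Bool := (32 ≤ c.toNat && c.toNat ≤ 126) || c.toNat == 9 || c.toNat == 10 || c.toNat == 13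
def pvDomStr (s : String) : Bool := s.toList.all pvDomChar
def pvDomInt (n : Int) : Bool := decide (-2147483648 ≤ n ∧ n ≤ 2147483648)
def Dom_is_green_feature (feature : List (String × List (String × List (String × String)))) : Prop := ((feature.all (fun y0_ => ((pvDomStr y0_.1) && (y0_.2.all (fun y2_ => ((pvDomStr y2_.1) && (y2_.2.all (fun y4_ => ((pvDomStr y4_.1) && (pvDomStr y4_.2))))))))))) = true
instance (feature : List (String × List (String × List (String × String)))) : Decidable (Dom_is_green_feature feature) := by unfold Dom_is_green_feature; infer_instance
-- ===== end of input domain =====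

-- B inverts the loop: it probes the fixed 4-entry GREEN_TAGS table with dict lookups instead of
-- scanning every input tag; the return value is unchanged (objective: simpler).

-- shared module constant GREEN_TAGS (each value is a Python set of distinct string literals)
def pvGreenTags : List (String × List String) :=
  [("landuse", PySem.Set.ofList ["grass", "flowerbed", "forest", "meadow", "recreation_ground",
      "greenery", "village_green", "allotments", "orchard", "vineyard",
      "plant_nursery", "greenhouse_horticulture", "tree_pit", "green"]),
   ("leisure", PySem.Set.ofList ["garden", "park", "nature_reserve", "common", "commons",
      "parklet", "recreation_ground", "disc_golf_course"]),
   ("natural", PySem.Set.ofList ["wood", "scrub", "grassland", "shrubbery",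
      "heath", "grass", "tree_group", "wetland"]),
   ("plant", PySem.Set.ofList ["tree"])]

-- str(v).strip().lower() for a string v (str(v) is the identity)
def pvNorm (v : String) : String := PySem.Str.lower (PySem.Str.strip v)

-- `x or {}` for an optional dict value: None → {}, and {} is the only falsy dict, so this is exact
def pvOrEmpty {α : Type} (o : Option (List α)) : List α :=
  match o with
  | some l => l
  | none => []

-- ===== PORT A =====
-- the `for k, v in tags.items():` loop of A, step for step
def pvLoopA : List (String × String) → Bool
  | [] => false
  | (k, v) :: rest =>
    match List.lookup k pvGreenTags with          -- `if k in GREEN_TAGS:` … `GREEN_TAGS[k]`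
    | some vals => if pvNorm v ∈ vals then true else pvLoopA rest
    | none => pvLoopA rest

def is_green_feature (feature : List (String × List (String × List (String × String)))) : Bool :=
  let props := pvOrEmpty ((PySem.Dict.ofList feature).get? "properties")
  let tags := PySem.Dict.ofList (pvOrEmpty ((PySem.Dict.ofList props).get? "tags"))
  if tags.items.isEmpty then false                -- `not isinstance(tags, dict) or not tags` (always a dict here)
  else pvLoopA tags.items

-- ===== PORT B =====
def is_green_feature_alt (feature : List (String × List (String × List (String × String)))) : Bool :=
  let props := pvOrEmpty ((PySem.Dict.ofList feature).get? "properties")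
  let tags := PySem.Dict.ofList (pvOrEmpty ((PySem.Dict.ofList props).get? "tags"))
  if tags.items.isEmpty then false                -- `not isinstance(tags, dict) or not tags`
  else pvGreenTags.any (fun kv =>                 -- `any(k in tags and str(tags[k]).strip().lower() in vals …)`
    match tags.get? kv.1 with                     -- `k in tags and … tags[k]` via one lookup
    | some v => decide (pvNorm v ∈ kv.2)
    | none => false)

-- ===== PRECONDITION & SPEC =====
def Spec_is_green_feature (feature : List (String × List (String × List (String × String)))) (out : Bool) : Prop := out = is_green_feature_alt feature
instance (feature : List (String × List (String × List (String × String)))) (out : Bool) : Decidable (Spec_is_green_feature feature out) := by unfold Spec_is_green_feature; infer_instance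

-- ===== CLAIM (what is proved, stated in full; the proofs are below) =====
def Claim_equal_is_green_feature : Prop := ∀ (feature : List (String × List (String × List (String × String)))), Dom_is_green_feature feature → Spec_is_green_feature feature (is_green_feature feature)

-- ===== LEMMAS AND PROOFS =====

-- A's loop is `any` of its per-pair test
lemma pvLoopA_eq_any (l : List (String × String)) :
    pvLoopA l = l.any (fun p =>
      match List.lookup p.1 pvGreenTags with
      | some vals => decide (pvNorm p.2 ∈ vals)
      | none => false) := by
  induction l with
  | nil => rfl
  | cons p rest ih =>
    obtain ⟨k, v⟩ := p
    simp only [pvLoopA, List.any_cons]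
    cases h : List.lookup k pvGreenTags with
    | none => simp [ih]
    | some vals =>
      by_cases hv : pvNorm v ∈ vals <;> simp [hv, ih]

lemma lookup_mem {α β : Type} [BEq α] [LawfulBEq α] {k : α} {b : β} {l : List (α × β)}
    (h : List.lookup k l = some b) : (k, b) ∈ l := by
  induction l with
  | nil => simp [List.lookup] at h
  | cons p rest ih =>
    obtain ⟨a, c⟩ := p
    simp only [List.lookup] at h
    by_cases hk : k = a
    · subst hk
      simp at h
      simp [h]
    · have : (k == a) = false := by simp [hk]
      rw [this] at h
      exact List.mem_cons_of_mem _ (ih h)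

-- pvGreenTags has distinct keys, so membership determines the lookup
lemma mem_lookup_green {k : String} {vals : List String}
    (h : (k, vals) ∈ pvGreenTags) : List.lookup k pvGreenTags = some vals := by
  simp only [pvGreenTags, List.mem_cons, Prod.mk.injEq, List.not_mem_nil, or_false] at h
  rcases h with ⟨rfl, rfl⟩ | ⟨rfl, rfl⟩ | ⟨rfl, rfl⟩ | ⟨rfl, rfl⟩ <;> rfl

-- the two iteration orders agree on any dict with distinct keys
lemma any_items_eq_any_green (d : PySem.Dict String String) (hnd : d.keys.Nodup) :
    (d.items.any (fun p =>
      match List.lookup p.1 pvGreenTags with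
      | some vals => decide (pvNorm p.2 ∈ vals)
      | none => false))
    = pvGreenTags.any (fun kv =>
      match d.get? kv.1 with
      | some v => decide (pvNorm v ∈ kv.2)
      | none => false) := by
  rw [Bool.eq_iff_iff]
  simp only [List.any_eq_true]
  constructor
  · rintro ⟨⟨k, v⟩, hmem, hp⟩
    cases h : List.lookup k pvGreenTags with
    | none => rw [h] at hp; simp at hp
    | some vals =>
      rw [h] at hp
      refine ⟨(k, vals), lookup_mem h, ?_⟩
      rw [PySem.Dict.get?_of_mem_items _ hmem hnd]
      exact hp
  · rintro ⟨⟨k, vals⟩, hmem, hp⟩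
    cases h : d.get? k with
    | none => rw [h] at hp; simp at hp
    | some v =>
      rw [h] at hp
      refine ⟨(k, v), PySem.Dict.mem_items_of_get?_eq_some _ h, ?_⟩
      rw [mem_lookup_green hmem]
      exact hp

-- ===== VERDICT (by name: the statement is the Claim_ definition above) =====
theorem is_green_feature_spec : Claim_equal_is_green_feature := by
  intro feature _
  have key : ∀ (l : List (String × String)),
      (if (PySem.Dict.ofList l).items.isEmpty then false
       else pvLoopA (PySem.Dict.ofList l).items)
      = (if (PySem.Dict.ofList l).items.isEmpty then false
       else pvGreenTags.any (fun kv =>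
         match (PySem.Dict.ofList l).get? kv.1 with
         | some v => decide (pvNorm v ∈ kv.2)
         | none => false)) := by
    intro l
    by_cases h : (PySem.Dict.ofList l).items.isEmpty
    · rw [if_pos h, if_pos h]
    · rw [if_neg h, if_neg h, pvLoopA_eq_any,
        any_items_eq_any_green _ (PySem.Dict.nodup_keys_ofList l)]
  show is_green_feature feature = is_green_feature_alt feature
  exact key (pvOrEmpty ((PySem.Dict.ofList (pvOrEmpty ((PySem.Dict.ofList feature).get? "properties"))).get? "tags"))
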